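-- pv_equiv track=rewrite | github.com/BartekASTAR/zbiorCKE | arkusze/maj2023pr/zad2.py | howManyBlocks
-- ===== SOURCE A (Python) =====
-- def howManyBlocks(number):
--     #number = dec2bin(number)
--     blocks = 1
--     last = number%10
--     number = number//10
--     while number > 0:
--         current = number % 10
--         if last != current:
--             blocks +=1
--         last = current
--         number = number//10
--     return blocks
-- ===== SOURCE B (Python) =====
-- import itertools
--
-- def howManyBlocks(number):
--     digits = [number % 10]
--     number //= 10
--     while number > 0:
--         digits.append(number % 10)
--         number //= 10
--     return sum(1 for _ in itertools.groupby(digits))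
-- ===== Notes on version B (the rewrite author's own statement) =====
-- stated objective: idiomatic
-- what changed: B materializes the digit list first and then counts runs with itertools.groupby, instead of A's inline comparison against a running 'last' scalar during extraction.
import Mathlib
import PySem

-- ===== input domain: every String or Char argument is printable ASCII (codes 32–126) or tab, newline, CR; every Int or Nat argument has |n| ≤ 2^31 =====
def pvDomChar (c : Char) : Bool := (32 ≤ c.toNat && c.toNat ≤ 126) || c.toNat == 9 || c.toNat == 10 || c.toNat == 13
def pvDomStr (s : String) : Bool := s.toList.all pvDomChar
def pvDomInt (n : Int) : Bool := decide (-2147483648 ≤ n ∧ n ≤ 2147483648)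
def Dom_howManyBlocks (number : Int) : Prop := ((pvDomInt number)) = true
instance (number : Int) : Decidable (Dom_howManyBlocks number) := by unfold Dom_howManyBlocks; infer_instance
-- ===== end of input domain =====

-- B materializes the digit list first and then counts runs via a groupby-style pass,
-- instead of A's inline comparison against a running 'last' scalar (idiomatic; same cost).

-- termination helper: floor-division by 10 shrinks a positive Int's toNat
theorem pvFloordivTen_lt (n : Int) (h : 0 < n) :
    (PySem.Int.floordiv n 10).toNat < n.toNat := by
  rw [PySem.Int.floordiv_eq_ediv_of_pos (by omega)]
  omega

-- ===== PORT A =====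
-- the while loop: state (blocks, last, number)
def howManyBlocksLoop (blocks last number : Int) : Int :=
  if h : 0 < number then
    let current := PySem.Int.mod number 10
    howManyBlocksLoop (if last ≠ current then blocks + 1 else blocks) current
      (PySem.Int.floordiv number 10)
  else blocks
termination_by number.toNat
decreasing_by exact pvFloordivTen_lt number h

def howManyBlocks (number : Int) : Int :=
  howManyBlocksLoop 1 (PySem.Int.mod number 10) (PySem.Int.floordiv number 10)

-- ===== PORT B =====
-- digit extraction: digits.append(number % 10); number //= 10  while number > 0
def pvDigitsLoop (number : Int) (digits : List Int) : List Int :=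
  if h : 0 < number then
    pvDigitsLoop (PySem.Int.floordiv number 10) (digits ++ [PySem.Int.mod number 10])
  else digits
termination_by number.toNat
decreasing_by exact pvFloordivTen_lt number h

-- sum(1 for _ in itertools.groupby(digits)): number of maximal runs of equal adjacent elements
def pvCountRuns : List Int → Int
  | [] => 0
  | [_] => 1
  | a :: b :: rest => (if a ≠ b then 1 else 0) + pvCountRuns (b :: rest)

def howManyBlocks_alt (number : Int) : Int :=
  pvCountRuns (pvDigitsLoop (PySem.Int.floordiv number 10)
    [PySem.Int.mod number 10])

-- ===== PRECONDITION & SPEC =====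
def Spec_howManyBlocks (number : Int) (out : Int) : Prop := out = howManyBlocks_alt number
instance (number : Int) (out : Int) : Decidable (Spec_howManyBlocks number out) := by unfold Spec_howManyBlocks; infer_instance

-- ===== CLAIM (what is proved, stated in full; the proofs are below) =====
def Claim_equal_howManyBlocks : Prop := ∀ (number : Int), Dom_howManyBlocks number → Spec_howManyBlocks number (howManyBlocks number)

-- ===== LEMMAS AND PROOFS =====

-- digits extracted from n, least significant first (the order both programs traverse)
def pvDigitsFrom (number : Int) : List Int :=
  if h : 0 < number then
    PySem.Int.mod number 10 :: pvDigitsFrom (PySem.Int.floordiv number 10)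
  else []
termination_by number.toNat
decreasing_by exact pvFloordivTen_lt number h

theorem pvDigitsLoop_eq (number : Int) (digits : List Int) :
    pvDigitsLoop number digits = digits ++ pvDigitsFrom number := by
  induction number, digits using pvDigitsLoop.induct with
  | case1 n ds h ih =>
      rw [pvDigitsLoop, pvDigitsFrom, dif_pos h, dif_pos h, ih, List.append_assoc]
      simp
  | case2 n ds h =>
      rw [pvDigitsLoop, pvDigitsFrom, dif_neg h, dif_neg h, List.append_nil]

theorem pvLoop_eq_countRuns (number blocks last : Int) :
    howManyBlocksLoop blocks last number =
      blocks - 1 + pvCountRuns (last :: pvDigitsFrom number) := by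
  induction number using pvDigitsFrom.induct generalizing blocks last with
  | case1 n h ih =>
      rw [howManyBlocksLoop, pvDigitsFrom]
      simp only [dif_pos h]
      rw [ih, pvCountRuns]
      split_ifs <;> ring
  | case2 n h =>
      rw [howManyBlocksLoop, pvDigitsFrom]
      simp only [dif_neg h]
      rw [pvCountRuns]
      ring

-- ===== VERDICT (by name: the statement is the Claim_ definition above) =====
theorem howManyBlocks_spec : Claim_equal_howManyBlocks := by
  intro n _
  unfold Spec_howManyBlocks howManyBlocks howManyBlocks_alt
  rw [pvLoop_eq_countRuns, pvDigitsLoop_eq, List.singleton_append]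
  ring
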